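-- pv_equiv track=rewrite | github.com/Oblivi8/BE_Final | app.py | boldify
-- ===== SOURCE A (Python) =====
-- def boldify(text):
--     # Split the text by "**" to isolate sections to be bolded
--     parts = text.split("**")
--     new_text = ""
--     # Iterate over the parts and apply bold formatting to every second element
--     for i, part in enumerate(parts):
--         if i % 2 == 1:  # This means the part should be bolded
--             new_text += f"<b>{part}</b><hr>"
--         else:  # This part should not be bolded
--             new_text += part
--     return new_text
-- ===== SOURCE B (Python) =====
-- def boldify(text):
--     # Single-pass character automaton: a pending-star flag and a bold flag;
--     # tags are emitted at marker boundaries, no substring search or split.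
--     out = []
--     bold = False
--     pending = False
--     for c in text:
--         if c == '*':
--             if pending:
--                 out.append("</b><hr>" if bold else "<b>")
--                 bold = not bold
--                 pending = False
--             else:
--                 pending = True
--         else:
--             if pending:
--                 out.append('*')
--                 pending = False
--             out.append(c)
--     if pending:
--         out.append('*')
--     if bold:
--         out.append("</b><hr>")
--     return ''.join(out)
-- ===== Notes on version B (the rewrite author's own statement) =====
-- stated objective: alternative
-- what changed: Replaces splitting on the double-star marker plus enumerate-parity over a parts list with a single-pass character-level automaton (pending-star flag + bold flag) that emits open/close tags at marker boundaries, never searching for or splitting on a substring.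
import Mathlib
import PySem

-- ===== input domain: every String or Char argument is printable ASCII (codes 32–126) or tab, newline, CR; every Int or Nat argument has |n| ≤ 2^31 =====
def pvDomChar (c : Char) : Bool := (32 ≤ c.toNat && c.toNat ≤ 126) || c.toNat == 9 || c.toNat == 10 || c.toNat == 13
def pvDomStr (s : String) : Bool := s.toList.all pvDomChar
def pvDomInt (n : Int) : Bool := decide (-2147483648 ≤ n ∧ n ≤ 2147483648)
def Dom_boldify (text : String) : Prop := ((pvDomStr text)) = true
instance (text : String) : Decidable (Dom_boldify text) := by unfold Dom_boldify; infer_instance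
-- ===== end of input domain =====

-- B replaces split("**") + enumerate parity with a single-pass character automaton
-- (pending-star flag + bold flag) emitting tags at marker boundaries (alternative, same O(n) cost).

-- ===== PORT A =====
-- split by "**", then bold every odd-indexed part, concatenating into new_text
def boldify (text : String) : String :=
  let parts := PySem.Chars.splitOn text.toList ['*', '*']
  let newText := List.foldl
    (fun (acc : List Char) (ip : Int × List Char) =>
      if PySem.Int.mod ip.1 2 == 1 then
        acc ++ ("<b>".toList ++ ip.2 ++ "</b><hr>".toList)
      else
        acc ++ ip.2)
    [] (PySem.List.enumerate parts)
  String.mk newText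

-- ===== PORT B =====
-- the for-loop over the characters with (bold, pending) state, plus the two trailing emissions
def boldifyAuto : List Char → Bool → Bool → List Char → List Char
  | [], bold, pending, out =>
      out ++ (if pending then ['*'] else []) ++ (if bold then "</b><hr>".toList else [])
  | c :: rest, bold, pending, out =>
      if c == '*' then
        if pending then
          boldifyAuto rest (!bold) false
            (out ++ (if bold then "</b><hr>".toList else "<b>".toList))
        else
          boldifyAuto rest bold true out
      else
        boldifyAuto rest bold false
          (out ++ (if pending then ['*'] else []) ++ [c])

def boldify_alt (text : String) : String :=
  String.mk (boldifyAuto text.toList false false [])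

-- ===== PRECONDITION & SPEC =====
def Spec_boldify (text : String) (out : String) : Prop := out = boldify_alt text
instance (text : String) (out : String) : Decidable (Spec_boldify text out) := by unfold Spec_boldify; infer_instance

-- ===== CLAIM (what is proved, stated in full; the proofs are below) =====
def Claim_equal_boldify : Prop := ∀ (text : String), Dom_boldify text → Spec_boldify text (boldify text)

-- ===== LEMMAS AND PROOFS =====

-- proof-side: the list of parts produced by splitting at each occurrence of "**", by find-recursion
def pvSplitF (l : List Char) : List (List Char) :=
  if h : PySem.Chars.find l ['*', '*'] = -1 then [l]
  else
    l.take (PySem.Chars.find l ['*', '*']).toNat ::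
      pvSplitF (l.drop ((PySem.Chars.find l ['*', '*']).toNat + 2))
termination_by l.length
decreasing_by
  have h0 : (0 : Int) ≤ PySem.Chars.find l ['*', '*'] := by
    have := PySem.Chars.neg_one_le_find l ['*', '*']
    omega
  have hinf : (['*', '*'] : List Char) <:+: l :=
    (PySem.Chars.find_nonneg_iff l ['*', '*']).mp h0
  have hlen := hinf.length_le
  simp only [List.length_cons, List.length_nil, List.length_drop] at hlen ⊢
  omega

theorem pvSplitF_ne_nil (l : List Char) : pvSplitF l ≠ [] := by
  rw [pvSplitF]
  split <;> simp

def pvModHead (pre : List Char) : List (List Char) → List (List Char)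
  | [] => [pre]
  | p :: t => (pre ++ p) :: t

def pvWrap (bold : Bool) (seg : List Char) : List Char :=
  if bold then "<b>".toList ++ seg ++ "</b><hr>".toList else seg

-- A's shape: wrap each part according to the alternating flag
def pvFF : List (List Char) → Bool → List Char
  | [], _ => []
  | p :: t, bold => pvWrap bold p ++ pvFF t (!bold)

-- B's shape: parts joined by alternating tags, closing tag at the end if bold
def pvG : List (List Char) → Bool → List Char
  | [], bold => if bold then "</b><hr>".toList else []
  | [p], bold => p ++ (if bold then "</b><hr>".toList else [])
  | p :: q :: t, bold =>
      p ++ (if bold then "</b><hr>".toList else "<b>".toList) ++ pvG (q :: t) (!bold)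

theorem pvModHead_modHead (a b : List Char) (X : List (List Char)) :
    pvModHead a (pvModHead b X) = pvModHead (a ++ b) X := by
  cases X <;> simp [pvModHead]

theorem pvSplitF_nil : pvSplitF [] = [[]] := by
  rw [pvSplitF]
  have : PySem.Chars.find [] ['*', '*'] = -1 := by
    rw [PySem.Chars.find_eq_neg_one_iff]
    intro hinf
    have := hinf.length_le
    simp at this
  simp [this]

-- splitting after a head character that does not start a marker
theorem pv_find_cons (c : Char) (rest : List Char)
    (hp : ¬ (['*', '*'] : List Char) <+: (c :: rest)) :
    pvSplitF (c :: rest) = pvModHead [c] (pvSplitF rest) := by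
  rcases eq_or_ne (PySem.Chars.find (c :: rest) ['*', '*']) (-1) with h | h
  · have hni : ¬ (['*', '*'] : List Char) <:+: (c :: rest) :=
      (PySem.Chars.find_eq_neg_one_iff _ _).mp h
    have hnr : PySem.Chars.find rest ['*', '*'] = -1 := by
      rw [PySem.Chars.find_eq_neg_one_iff]
      intro hinf
      exact hni (hinf.trans (List.suffix_cons c rest).isInfix)
    have hsr : pvSplitF rest = [rest] := by
      rw [pvSplitF]; simp [hnr]
    rw [pvSplitF, hsr]
    simp [h, pvModHead]
  · have h0 : 0 ≤ PySem.Chars.find (c :: rest) ['*', '*'] := by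
      have := PySem.Chars.neg_one_le_find (c :: rest) ['*', '*']
      omega
    obtain ⟨hpre, hmin⟩ := PySem.Chars.find_spec h0
    obtain ⟨m, hm⟩ : ∃ m, (PySem.Chars.find (c :: rest) ['*', '*']).toNat = m + 1 := by
      refine ⟨(PySem.Chars.find (c :: rest) ['*', '*']).toNat - 1, ?_⟩
      have hne0 : (PySem.Chars.find (c :: rest) ['*', '*']).toNat ≠ 0 := by
        intro h0'
        rw [h0'] at hpre
        exact hp (by simpa using hpre)
      omega
    have hpre' : (['*', '*'] : List Char) <+: rest.drop m := by
      rw [hm] at hpre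
      simpa [List.drop_succ_cons] using hpre
    have h0r : 0 ≤ PySem.Chars.find rest ['*', '*'] := by
      rw [PySem.Chars.find_nonneg_iff]
      exact hpre'.isInfix.trans (List.drop_suffix m rest).isInfix
    obtain ⟨hprer, hminr⟩ := PySem.Chars.find_spec h0r
    have hle1 : (PySem.Chars.find rest ['*', '*']).toNat ≤ m := by
      by_contra hcon
      exact hminr m (by omega) hpre'
    have hle2 : m ≤ (PySem.Chars.find rest ['*', '*']).toNat := by
      by_contra hcon
      have hmm := hmin ((PySem.Chars.find rest ['*', '*']).toNat + 1) (by omega)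
      rw [List.drop_succ_cons] at hmm
      exact hmm hprer
    have hjm : (PySem.Chars.find rest ['*', '*']).toNat = m := le_antisymm hle1 hle2
    have hrne : PySem.Chars.find rest ['*', '*'] ≠ -1 := by omega
    have hdrop : List.drop (m + 1 + 2) (c :: rest) = List.drop (m + 2) rest := by
      have h32 : m + 1 + 2 = (m + 2) + 1 := by omega
      rw [h32, List.drop_succ_cons]
    conv_lhs => rw [pvSplitF]
    conv_rhs => rw [pvSplitF]
    rw [dif_neg h, dif_neg hrne, hm, hjm, hdrop, List.take_succ_cons]
    simp [pvModHead]

-- splitting a string that starts with the marker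
theorem pv_split_marker (r : List Char) :
    pvSplitF ('*' :: '*' :: r) = [] :: pvSplitF r := by
  have hpre : (['*', '*'] : List Char) <+: ('*' :: '*' :: r) := ⟨r, rfl⟩
  have h0 : 0 ≤ PySem.Chars.find ('*' :: '*' :: r) ['*', '*'] := by
    rw [PySem.Chars.find_nonneg_iff]
    exact hpre.isInfix
  obtain ⟨_, hmin⟩ := PySem.Chars.find_spec h0
  have hj0 : (PySem.Chars.find ('*' :: '*' :: r) ['*', '*']).toNat = 0 := by
    by_contra hcon
    exact hmin 0 (by omega) (by simpa using hpre)
  have hne : PySem.Chars.find ('*' :: '*' :: r) ['*', '*'] ≠ -1 := by omega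
  conv_lhs => rw [pvSplitF]
  rw [dif_neg hne, hj0]
  simp

-- one-step unfoldings of the split loop (structural in the fuel)
theorem pv_go_succ_nil (n : Nat) (cur : List Char) (acc : List (List Char)) :
    PySem.Chars.splitOn.go ['*', '*'] (n + 1) [] cur acc = (cur.reverse :: acc).reverse := rfl

theorem pv_go_succ_cons (n : Nat) (c : Char) (rest cur : List Char) (acc : List (List Char)) :
    PySem.Chars.splitOn.go ['*', '*'] (n + 1) (c :: rest) cur acc =
      if (['*', '*'] : List Char).isPrefixOf (c :: rest) then
        PySem.Chars.splitOn.go ['*', '*'] n ((c :: rest).drop 2) [] (cur.reverse :: acc)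
      else
        PySem.Chars.splitOn.go ['*', '*'] n rest (c :: cur) acc := rfl

theorem pvModHead_nil (X : List (List Char)) (h : X ≠ []) : pvModHead [] X = X := by
  cases X with
  | nil => exact absurd rfl h
  | cons p t => simp [pvModHead]

-- go with enough fuel computes pvSplitF (with the accumulators flushed)
theorem pv_go_eq (fuel : Nat) : ∀ (l cur : List Char) (acc : List (List Char)),
    l.length < fuel →
    PySem.Chars.splitOn.go ['*', '*'] fuel l cur acc =
      acc.reverse ++ pvModHead cur.reverse (pvSplitF l) := by
  induction fuel with
  | zero => intro l cur acc h; omega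
  | succ n ih =>
    intro l cur acc h
    cases l with
    | nil =>
      rw [pv_go_succ_nil, pvSplitF_nil]
      simp [pvModHead]
    | cons c rest =>
      rw [pv_go_succ_cons]
      by_cases hp : (['*', '*'] : List Char).isPrefixOf (c :: rest)
      · rw [if_pos hp]
        have hpre : (['*', '*'] : List Char) <+: (c :: rest) := List.isPrefixOf_iff_prefix.mp hp
        have hlen2 : 2 ≤ (c :: rest).length := by simpa using hpre.length_le
        rw [ih ((c :: rest).drop 2) [] (cur.reverse :: acc) (by simp only [List.length_drop, List.length_cons] at h ⊢; omega)]
        obtain ⟨r, hr⟩ := hpre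
        have hcr : c :: rest = '*' :: '*' :: r := hr.symm
        have hd : List.drop 2 ('*' :: '*' :: r) = r := rfl
        rw [hcr, hd, pv_split_marker, List.reverse_nil, pvModHead_nil _ (pvSplitF_ne_nil r)]
        simp [pvModHead]
      · rw [if_neg hp]
        rw [ih rest (c :: cur) acc (by simp only [List.length_cons] at h; omega)]
        rw [pv_find_cons c rest (fun hpre => hp (List.isPrefixOf_iff_prefix.mpr hpre)),
          pvModHead_modHead]
        simp

theorem pv_splitOn_eq (l : List Char) :
    PySem.Chars.splitOn l ['*', '*'] = pvSplitF l := by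
  show PySem.Chars.splitOn.go ['*', '*'] (l.length + 1) l [] [] = pvSplitF l
  rw [pv_go_eq (l.length + 1) l [] [] (by omega)]
  simp [pvModHead_nil _ (pvSplitF_ne_nil l)]

theorem pv_mod_toggle (k : Int) (h : 0 ≤ k) :
    ((PySem.Int.mod (k + 1) 2 == 1) : Bool) = !((PySem.Int.mod k 2 == 1) : Bool) := by
  have e1 : PySem.Int.mod (k + 1) 2 = (k + 1) % 2 := by
    simp [PySem.Int.mod, Int.fmod_eq_emod]
  have e2 : PySem.Int.mod k 2 = k % 2 := by
    simp [PySem.Int.mod, Int.fmod_eq_emod]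
  rw [e1, e2]
  have h2 : k % 2 = 0 ∨ k % 2 = 1 := by omega
  rcases h2 with h2 | h2 <;>
  · have h3 : (k + 1) % 2 = 1 - k % 2 := by omega
    simp [h2, h3]

-- A's enumerate-fold is pvFF with the parity flag of the start index
theorem pv_fold_eq (parts : List (List Char)) : ∀ (k : Int) (acc : List Char), 0 ≤ k →
    List.foldl
      (fun (acc : List Char) (ip : Int × List Char) =>
        if PySem.Int.mod ip.1 2 == 1 then
          acc ++ ("<b>".toList ++ ip.2 ++ "</b><hr>".toList)
        else
          acc ++ ip.2)
      acc (PySem.List.enumerate parts k)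
    = acc ++ pvFF parts (PySem.Int.mod k 2 == 1) := by
  induction parts with
  | nil => intro k acc hk; simp [PySem.List.enumerate, pvFF]
  | cons p t ih =>
    intro k acc hk
    simp only [PySem.List.enumerate, List.foldl_cons]
    rw [ih (k + 1) _ (by omega), pv_mod_toggle k hk]
    simp only [pvFF, pvWrap]
    split_ifs <;> simp

-- the wrap form and the between-tags form agree on nonempty part lists
theorem pvFF_eq_pvG : ∀ (parts : List (List Char)) (bold : Bool), parts ≠ [] →
    pvFF parts bold = (if bold then "<b>".toList else []) ++ pvG parts bold := by
  intro parts
  induction parts with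
  | nil => intro bold h; exact absurd rfl h
  | cons p t ih =>
    intro bold _
    cases t with
    | nil => cases bold <;> simp [pvFF, pvG, pvWrap]
    | cons q t' =>
      rw [pvFF, ih (!bold) (by simp), pvG]
      cases bold <;> simp [pvWrap]

theorem pvG_modHead (a : List Char) (X : List (List Char)) (bold : Bool) (h : X ≠ []) :
    pvG (pvModHead a X) bold = a ++ pvG X bold := by
  cases X with
  | nil => exact absurd rfl h
  | cons p t =>
    cases t <;> simp [pvModHead, pvG]

-- B's automaton (pending = false) computes pvG over the split parts
theorem pv_auto_eq (n : Nat) : ∀ (l : List Char) (bold : Bool) (out : List Char),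
    l.length < n →
    boldifyAuto l bold false out = out ++ pvG (pvSplitF l) bold := by
  induction n with
  | zero => intro l bold out h; omega
  | succ n ih =>
    intro l bold out h
    cases l with
    | nil =>
      rw [pvSplitF_nil]
      cases bold <;> simp [boldifyAuto, pvG]
    | cons c rest =>
      by_cases hc : c = '*'
      · subst hc
        -- pending becomes true; case on the next character
        cases rest with
        | nil =>
          have hs : pvSplitF ['*'] = [['*']] := by
            rw [pvSplitF]
            have : PySem.Chars.find ['*'] ['*', '*'] = -1 := by
              rw [PySem.Chars.find_eq_neg_one_iff]
              intro hinf
              have := hinf.length_le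
              simp at this
            simp [this]
          rw [hs]
          cases bold <;> simp [boldifyAuto, pvG]
        | cons c2 rest2 =>
          by_cases hc2 : c2 = '*'
          · subst hc2
            rw [pv_split_marker]
            have hstep : boldifyAuto ('*' :: '*' :: rest2) bold false out =
                boldifyAuto rest2 (!bold) false
                  (out ++ (if bold then "</b><hr>".toList else "<b>".toList)) := by
              simp [boldifyAuto]
            rw [hstep, ih rest2 (!bold) _ (by simp at h; omega)]
            rcases (List.exists_cons_of_ne_nil (pvSplitF_ne_nil rest2)) with ⟨p, t, hpt⟩
            rw [hpt]
            cases t <;> cases bold <;> simp [pvG]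
          · have hnp : ¬ (['*', '*'] : List Char) <+: ('*' :: c2 :: rest2) := by
              intro hpre
              rcases hpre with ⟨r, hr⟩
              simp at hr
              exact hc2 hr.1.symm
            rw [pv_find_cons _ _ hnp,
              pv_find_cons c2 rest2 (by intro hpre; rcases hpre with ⟨r, hr⟩; simp at hr; exact hc2 hr.1.symm)]
            rw [pvModHead_modHead]
            have hstep : boldifyAuto ('*' :: c2 :: rest2) bold false out =
                boldifyAuto rest2 bold false (out ++ ['*'] ++ [c2]) := by
              have hcb : (c2 == '*') = false := by
                simp [hc2]
              simp [boldifyAuto, hcb]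
            rw [hstep, ih rest2 bold _ (by simp at h; omega),
              pvG_modHead _ _ _ (pvSplitF_ne_nil rest2)]
            simp
      · have hnp : ¬ (['*', '*'] : List Char) <+: (c :: rest) := by
          intro hpre
          rcases hpre with ⟨r, hr⟩
          simp at hr
          exact hc hr.1.symm
        rw [pv_find_cons _ _ hnp]
        have hstep : boldifyAuto (c :: rest) bold false out =
            boldifyAuto rest bold false (out ++ [] ++ [c]) := by
          have hcb : (c == '*') = false := by simp [hc]
          simp [boldifyAuto, hcb]
        rw [hstep, ih rest bold _ (by simp at h; omega),
          pvG_modHead _ _ _ (pvSplitF_ne_nil rest)]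
        simp

-- ===== VERDICT (by name: the statement is the Claim_ definition above) =====
theorem boldify_spec : Claim_equal_boldify := by
  intro text _
  show boldify text = boldify_alt text
  show String.mk (List.foldl
      (fun (acc : List Char) (ip : Int × List Char) =>
        if PySem.Int.mod ip.1 2 == 1 then
          acc ++ ("<b>".toList ++ ip.2 ++ "</b><hr>".toList)
        else
          acc ++ ip.2)
      [] (PySem.List.enumerate (PySem.Chars.splitOn text.toList ['*', '*']))) =
    String.mk (boldifyAuto text.toList false false [])
  rw [pv_auto_eq (text.toList.length + 1) text.toList false [] (by omega)]
  rw [pv_splitOn_eq, pv_fold_eq _ 0 [] le_rfl]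
  have hm0 : ((PySem.Int.mod 0 2 == 1) : Bool) = false := by decide
  rw [hm0, pvFF_eq_pvG _ false (pvSplitF_ne_nil _)]
  simp
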